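-- pv_equiv track=rewrite | github.com/eantaev/problem-solving | max_nonnegative_subarray.py | max_nn_subarray
-- ===== SOURCE A (Python) =====
-- def max_nn_subarray(vs):
--     max_start = 0
--     max_end = 0
--     max_sum = 0
--
--     start = 0
--     current_sum = 0
--     i = 0
--     input_length = len(vs)
--     # Inv: vs[max_start:max_end] is a result for input vs[:i]
--     # Inv: vs[start:i] is a candidate solution (i.e. has no negative elements)
--     # Inv: sum(vs[start:i]) = current_sum
--     # Check Inv
--     while i <= input_length:
--         if i == input_length or vs[i] < 0:
--             if (current_sum > max_sum
--                 or (current_sum == max_sum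
--                     and max_end - max_start < i - start)):
--                 max_start = start
--                 max_end = i
--                 max_sum = current_sum
--             start = i + 1
--             current_sum = 0
--         else:
--             current_sum += vs[i]
--         # Check Inv
--         i += 1
--     return vs[max_start:max_end]
-- ===== SOURCE B (Python) =====
-- def max_nn_subarray(vs):
--     # Two-phase: collect maximal non-negative runs as (start, end, sum), then pick the best.
--     runs = []
--     start = None
--     acc = 0
--     for j, v in enumerate(vs):
--         if v < 0:
--             if start is not None:
--                 runs.append((start, j, acc))
--             start, acc = None, 0
--         else:
--             if start is None:
--                 start = j
--             acc += v
--     if start is not None: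
--         runs.append((start, len(vs), acc))
--     best = (0, 0)
--     best_key = (0, 0)
--     for a, b, s in runs:
--         if (s, b - a) > best_key:
--             best, best_key = (a, b), (s, b - a)
--     return vs[best[0]:best[1]]
-- ===== Notes on version B (the rewrite author's own statement) =====
-- stated objective: alternative
-- what changed: A selects the best run on the fly inside a single index-driven while loop with five state variables; B decomposes the task into two phases: first materialise the list of maximal non-negative runs as (start, end, sum) triples, then fold Python tuple comparison over that run list to pick the best, slicing the original list at the end.
import Mathlib
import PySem

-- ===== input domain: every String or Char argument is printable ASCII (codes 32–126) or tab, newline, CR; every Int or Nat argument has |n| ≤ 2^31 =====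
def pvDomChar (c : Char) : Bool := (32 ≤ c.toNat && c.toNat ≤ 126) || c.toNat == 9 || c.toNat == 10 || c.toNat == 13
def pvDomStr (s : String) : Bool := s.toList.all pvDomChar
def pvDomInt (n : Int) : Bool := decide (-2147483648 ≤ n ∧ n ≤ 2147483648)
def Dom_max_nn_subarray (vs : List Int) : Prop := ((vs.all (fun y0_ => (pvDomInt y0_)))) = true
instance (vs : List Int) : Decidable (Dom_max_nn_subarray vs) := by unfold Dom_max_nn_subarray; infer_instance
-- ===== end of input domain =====

-- B replaces A's single stateful while loop by a two-phase decomposition (collect non-negative runs, then select the best); same O(n) cost, return value proved identical.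

-- ===== PORT A =====
-- one iteration of A's while-loop body at index i (state: max_start, max_end, max_sum, start, current_sum)
def aStep (vs : List Int) (n : Int) (st : Int × Int × Int × Int × Int) (i : Int) :
    Int × Int × Int × Int × Int :=
  match st with
  | (ms, me, msum, start, cur) =>
    if i = n ∨ (PySem.List.pyGet? vs i).getD 0 < 0 then
      if msum < cur ∨ (cur = msum ∧ me - ms < i - start) then
        (start, i, cur, i + 1, 0)
      else
        (ms, me, msum, i + 1, 0)
    else
      (ms, me, msum, start, cur + (PySem.List.pyGet? vs i).getD 0)

def max_nn_subarray (vs : List Int) : List Int :=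
  let n : Int := vs.length
  let st := (PySem.List.pyRange 0 (n + 1) 1).foldl (aStep vs n) (0, 0, 0, 0, 0)
  PySem.List.slice vs (some st.1) (some st.2.1)

-- ===== PORT B =====
-- body of B's first for-loop (state: runs, start : Option, acc)
def bStep (st : List (Int × Int × Int) × Option Int × Int) (jv : Int × Int) :
    List (Int × Int × Int) × Option Int × Int :=
  if jv.2 < 0 then
    ((match st.2.1 with
      | some a => st.1 ++ [(a, jv.1, st.2.2)]
      | none => st.1), none, 0)
  else
    (st.1,
     (match st.2.1 with
      | none => some jv.1
      | some a => some a), st.2.2 + jv.2)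

-- the trailing 'if start is not None: runs.append((start, len(vs), acc))'
def bClose (st : List (Int × Int × Int) × Option Int × Int) (n : Int) : List (Int × Int × Int) :=
  match st.2.1 with
  | some a => st.1 ++ [(a, n, st.2.2)]
  | none => st.1

def bPhase1 (vs : List Int) : List (Int × Int × Int) :=
  bClose ((PySem.List.enumerate vs 0).foldl bStep ([], none, 0)) (vs.length : Int)

-- body of B's second for-loop; state ((best_start, best_end), (best_sum, best_len));
-- '(s, b - a) > best_key' on Python tuples is: bs < s or (s == bs and bl < b - a)
def bSelStep (st : (Int × Int) × Int × Int) (r : Int × Int × Int) : (Int × Int) × Int × Int :=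
  if st.2.1 < r.2.2 ∨ (r.2.2 = st.2.1 ∧ st.2.2 < r.2.1 - r.1) then
    ((r.1, r.2.1), r.2.2, r.2.1 - r.1)
  else st

def bSelect (runs : List (Int × Int × Int)) : (Int × Int) × Int × Int :=
  runs.foldl bSelStep ((0, 0), 0, 0)

def max_nn_subarray_alt (vs : List Int) : List Int :=
  let best := (bSelect (bPhase1 vs)).1
  PySem.List.slice vs (some best.1) (some best.2)

-- ===== PRECONDITION & SPEC =====
def Spec_max_nn_subarray (vs : List Int) (out : List Int) : Prop := out = max_nn_subarray_alt vs
instance (vs : List Int) (out : List Int) : Decidable (Spec_max_nn_subarray vs out) := by unfold Spec_max_nn_subarray; infer_instance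

-- ===== CLAIM (what is proved, stated in full; the proofs are below) =====
def Claim_equal_max_nn_subarray : Prop := ∀ (vs : List Int), Dom_max_nn_subarray vs → Spec_max_nn_subarray vs (max_nn_subarray vs)

-- ===== LEMMAS AND PROOFS =====

-- A's loop as structural recursion on the unprocessed suffix (i = absolute index of the suffix head);
-- the [] case is the final i == len(vs) iteration
def aRec : List Int → Int → Int × Int × Int × Int × Int → Int × Int × Int × Int × Int
  | [], i, (ms, me, msum, start, cur) =>
      if msum < cur ∨ (cur = msum ∧ me - ms < i - start) then (start, i, cur, i + 1, 0)
      else (ms, me, msum, i + 1, 0)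
  | v :: t, i, (ms, me, msum, start, cur) =>
      if v < 0 then
        if msum < cur ∨ (cur = msum ∧ me - ms < i - start) then aRec t (i + 1) (start, i, cur, i + 1, 0)
        else aRec t (i + 1) (ms, me, msum, i + 1, 0)
      else aRec t (i + 1) (ms, me, msum, start, cur + v)

-- the runs B's phase 1 still produces from a suffix, given the open run (start, sum so far)
def runsF : List Int → Int → Option (Int × Int) → List (Int × Int × Int)
  | [], i, some (a, s) => [(a, i, s)]
  | [], _, none => []
  | v :: t, i, some (a, s) =>
      if v < 0 then (a, i, s) :: runsF t (i + 1) none else runsF t (i + 1) (some (a, s + v))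
  | v :: t, i, none =>
      if v < 0 then runsF t (i + 1) none else runsF t (i + 1) (some (i, v))

-- B's selection with the redundant best_len dropped (it is best_end - best_start)
def selF : List (Int × Int × Int) → Int × Int × Int → Int × Int × Int
  | [], st => st
  | (a, b, s) :: rest, (ms, me, msum) =>
      selF rest (if msum < s ∨ (s = msum ∧ me - ms < b - a) then (a, b, s) else (ms, me, msum))

lemma foldA (vs : List Int) : ∀ (l pre : List Int) (st : Int × Int × Int × Int × Int),
    pre ++ l = vs →
    (PySem.List.pyRange (pre.length : Int) ((vs.length : Int) + 1) 1).foldl (aStep vs (vs.length : Int)) st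
      = aRec l (pre.length : Int) st := by
  intro l
  induction l with
  | nil =>
    intro pre st h
    have hpre : pre = vs := by simpa using h
    subst hpre
    rw [PySem.List.pyRange_one_singleton, List.foldl_cons, List.foldl_nil]
    obtain ⟨ms, me, msum, start, cur⟩ := st
    simp [aStep, aRec]
  | cons v t ih =>
    intro pre st h
    have hlen : vs.length = pre.length + t.length + 1 := by
      rw [← h]; simp [List.length_append]; omega
    have hlt : (pre.length : Int) < (vs.length : Int) + 1 := by
      have : pre.length < vs.length + 1 := by omega
      exact_mod_cast this
    have hne : ((pre.length : Int)) ≠ (vs.length : Int) := by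
      have : pre.length ≠ vs.length := by omega
      exact_mod_cast this
    rw [PySem.List.pyRange_one_cons hlt, List.foldl_cons]
    have hget : PySem.List.pyGet? vs ((pre.length : Nat) : Int) = some v := by
      rw [← h]; exact PySem.List.pyGet?_append_length pre t v
    have hstep : ∀ st', (PySem.List.pyRange ((pre.length : Int) + 1) ((vs.length : Int) + 1) 1).foldl (aStep vs (vs.length : Int)) st' = aRec t ((pre.length : Int) + 1) st' := by
      intro st'
      have hc : (((pre ++ [v]).length : Nat) : Int) = (pre.length : Int) + 1 := by
        simp
      have := ih (pre ++ [v]) st' (by simpa using h)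
      rwa [hc] at this
    obtain ⟨ms, me, msum, start, cur⟩ := st
    simp only [aStep, hget, Option.getD_some]
    by_cases hv : v < 0
    · simp only [hne, hv, or_true, if_true, aRec]
      by_cases hcond : msum < cur ∨ (cur = msum ∧ me - ms < (pre.length : Int) - start)
      · rw [if_pos hcond, if_pos hcond, hstep]
      · rw [if_neg hcond, if_neg hcond, hstep]
    · simp only [hne, hv, or_false, if_false, aRec, hstep]

lemma foldB : ∀ (l : List Int) (j : Int) (runs : List (Int × Int × Int)) (op : Option (Int × Int)),
    bClose ((PySem.List.enumerate l j).foldl bStep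
        (match op with | none => (runs, none, 0) | some (a, s) => (runs, some a, s))) (j + l.length)
      = runs ++ runsF l j op := by
  intro l
  induction l with
  | nil =>
    intro j runs op
    rcases op with _ | ⟨a, s⟩
    · simp [PySem.List.enumerate, bClose, runsF]
    · simp [PySem.List.enumerate, bClose, runsF]
  | cons v t ih =>
    intro j runs op
    rw [PySem.List.enumerate_cons, List.foldl_cons]
    have hlen : (j + ((v :: t).length : Int)) = (j + 1) + (t.length : Int) := by
      simp; omega
    by_cases hv : v < 0
    · rcases op with _ | ⟨a, s⟩
      · simp only [bStep, if_pos hv]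
        rw [hlen]
        have := ih (j + 1) runs none
        simpa [runsF, hv] using this
      · simp only [bStep, if_pos hv]
        rw [hlen]
        have := ih (j + 1) (runs ++ [(a, j, s)]) none
        simp only [runsF, if_pos hv]
        simpa [List.append_assoc] using this
    · rcases op with _ | ⟨a, s⟩
      · simp only [bStep, if_neg hv]
        rw [hlen]
        have := ih (j + 1) runs (some (j, 0 + v))
        simpa [runsF, hv, zero_add] using this
      · simp only [bStep, if_neg hv]
        rw [hlen]
        have := ih (j + 1) runs (some (a, s + v))
        simpa [runsF, hv] using this

lemma selRel : ∀ (runs : List (Int × Int × Int)) (ms me msum : Int),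
    runs.foldl bSelStep ((ms, me), msum, me - ms)
      = (((selF runs (ms, me, msum)).1, (selF runs (ms, me, msum)).2.1),
         (selF runs (ms, me, msum)).2.2, (selF runs (ms, me, msum)).2.1 - (selF runs (ms, me, msum)).1) := by
  intro runs
  induction runs with
  | nil => intro ms me msum; simp [selF]
  | cons r rest ih =>
    intro ms me msum
    obtain ⟨a, b, s⟩ := r
    simp only [List.foldl_cons, selF, bSelStep]
    split_ifs with h
    · exact ih a b s
    · exact ih ms me msum

lemma mainA : ∀ (l : List Int) (i ms me msum start cur : Int) (op : Option (Int × Int)),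
    (op = none → start = i ∧ cur = 0) →
    (∀ a s, op = some (a, s) → a = start ∧ s = cur) →
    ms ≤ me → 0 ≤ msum → start ≤ i → 0 ≤ cur →
    ((aRec l i (ms, me, msum, start, cur)).1,
     (aRec l i (ms, me, msum, start, cur)).2.1,
     (aRec l i (ms, me, msum, start, cur)).2.2.1)
      = selF (runsF l i op) (ms, me, msum) := by
  intro l
  induction l with
  | nil =>
    intro i ms me msum start cur op hnone hsome hms hmsum hsi hcur
    rcases op with _ | ⟨a, s⟩
    · obtain ⟨h1, h2⟩ := hnone rfl
      subst h2
      have hc : ¬ (msum < (0:Int) ∨ ((0:Int) = msum ∧ me - ms < i - start)) := by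
        rintro (h | ⟨h1', h2'⟩) <;> omega
      simp only [aRec, runsF, selF, if_neg hc]
    · obtain ⟨h1, h2⟩ := hsome a s rfl
      subst h1; subst h2
      simp only [aRec, runsF, selF]
      split_ifs with h <;> rfl
  | cons v t ih =>
    intro i ms me msum start cur op hnone hsome hms hmsum hsi hcur
    by_cases hv : v < 0
    · rcases op with _ | ⟨a, s⟩
      · obtain ⟨h1, h2⟩ := hnone rfl
        subst h2
        have hc : ¬ (msum < (0:Int) ∨ ((0:Int) = msum ∧ me - ms < i - start)) := by
          rintro (h | ⟨h1', h2'⟩) <;> omega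
        simp only [aRec, runsF, if_pos hv, if_neg hc]
        exact ih (i + 1) ms me msum (i + 1) 0 none (fun _ => ⟨rfl, rfl⟩)
          (fun _ _ h => by cases h) hms hmsum le_rfl le_rfl
      · obtain ⟨h1, h2⟩ := hsome a s rfl
        subst h1; subst h2
        simp only [aRec, runsF, if_pos hv, selF]
        by_cases hc : msum < s ∨ (s = msum ∧ me - ms < i - a)
        · rw [if_pos hc, if_pos hc]
          exact ih (i + 1) a i s (i + 1) 0 none (fun _ => ⟨rfl, rfl⟩)
            (fun _ _ h => by cases h) hsi hcur le_rfl le_rfl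
        · rw [if_neg hc, if_neg hc]
          exact ih (i + 1) ms me msum (i + 1) 0 none (fun _ => ⟨rfl, rfl⟩)
            (fun _ _ h => by cases h) hms hmsum le_rfl le_rfl
    · have hv' : (0:Int) ≤ v := by omega
      rcases op with _ | ⟨a, s⟩
      · obtain ⟨h1, h2⟩ := hnone rfl
        subst h2
        simp only [aRec, runsF, if_neg hv]
        exact ih (i + 1) ms me msum start (0 + v) (some (i, v)) (fun h => by cases h)
          (fun a' s' h => by cases h; exact ⟨h1.symm, (zero_add v).symm⟩) hms hmsum (by omega) (by omega)
      · obtain ⟨h1, h2⟩ := hsome a s rfl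
        subst h1; subst h2
        simp only [aRec, runsF, if_neg hv]
        exact ih (i + 1) ms me msum a (s + v) (some (a, s + v)) (fun h => by cases h)
          (fun a' s' h => by cases h; exact ⟨rfl, rfl⟩) hms hmsum (by omega) (by omega)

-- ===== VERDICT (by name: the statement is the Claim_ definition above) =====
theorem max_nn_subarray_spec : Claim_equal_max_nn_subarray := by
  intro vs _
  unfold Spec_max_nn_subarray
  show max_nn_subarray vs = max_nn_subarray_alt vs
  have hA : (PySem.List.pyRange 0 ((vs.length : Int) + 1) 1).foldl (aStep vs (vs.length : Int)) (0, 0, 0, 0, 0)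
      = aRec vs 0 (0, 0, 0, 0, 0) := by
    have := foldA vs vs [] (0, 0, 0, 0, 0) (by simp)
    simpa using this
  have hB : bPhase1 vs = runsF vs 0 none := by
    have := foldB vs 0 [] none
    simpa [bPhase1] using this
  have hS : bSelect (runsF vs 0 none)
      = (((selF (runsF vs 0 none) (0, 0, 0)).1, (selF (runsF vs 0 none) (0, 0, 0)).2.1),
         (selF (runsF vs 0 none) (0, 0, 0)).2.2,
         (selF (runsF vs 0 none) (0, 0, 0)).2.1 - (selF (runsF vs 0 none) (0, 0, 0)).1) := by
    have := selRel (runsF vs 0 none) 0 0 0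
    simpa [bSelect] using this
  have hmain := mainA vs 0 0 0 0 0 0 none (fun _ => ⟨rfl, rfl⟩) (fun a s h => by cases h)
    le_rfl le_rfl le_rfl le_rfl
  have h1 : (aRec vs 0 (0, 0, 0, 0, 0)).1 = (selF (runsF vs 0 none) (0, 0, 0)).1 :=
    congrArg Prod.fst hmain
  have h2 : (aRec vs 0 (0, 0, 0, 0, 0)).2.1 = (selF (runsF vs 0 none) (0, 0, 0)).2.1 :=
    congrArg (fun p => p.2.1) hmain
  simp only [max_nn_subarray, max_nn_subarray_alt]
  rw [hA, hB, hS, h1, h2]
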